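-- pv_equiv track=rewrite | github.com/HaoranLiu14/BugSum | DataPreprocess/DataPreprocess.py | SignCounter
-- ===== SOURCE A (Python) =====
-- def SignCounter(Sentence):
--     counter = 0
--     puntc = ['?', ',', '.', '!', ' ', '>']
--     for i in Sentence:
--         if ((i>='a' and i<='z') or (i>='A' and i<='Z') or i in puntc):
--             continue
--         else:
--             counter = counter + 1
--     return counter
-- ===== SOURCE B (Python) =====
-- import re
--
-- _NON_SIGN = re.compile(r'[^A-Za-z?,.!> ]')
--
-- def SignCounter(Sentence):
--     return len(_NON_SIGN.findall(Sentence))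
-- ===== Notes on version B (the rewrite author's own statement) =====
-- stated objective: idiomatic
-- what changed: Replaces the explicit per-character loop with counter and membership tests by a single precompiled regex character class matching exactly the counted characters; B returns the length of its findall matches.
import Mathlib
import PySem

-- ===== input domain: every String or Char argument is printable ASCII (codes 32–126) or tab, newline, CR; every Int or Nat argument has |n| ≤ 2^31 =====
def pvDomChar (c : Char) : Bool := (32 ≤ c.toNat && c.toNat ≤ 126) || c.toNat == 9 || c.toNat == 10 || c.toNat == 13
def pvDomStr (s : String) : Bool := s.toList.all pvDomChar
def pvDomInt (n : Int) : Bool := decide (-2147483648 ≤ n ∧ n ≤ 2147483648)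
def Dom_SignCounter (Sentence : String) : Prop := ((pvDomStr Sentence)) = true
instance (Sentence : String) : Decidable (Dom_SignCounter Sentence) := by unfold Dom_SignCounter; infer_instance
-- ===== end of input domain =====

-- B replaces A's explicit counting loop by a regex character class [^A-Za-z?,.!> ] and counts its matches (idiomatic; same cost).


-- ===== PORT A =====
-- for i in Sentence: if (('a'<=i<='z') or ('A'<=i<='Z') or i in puntc): continue else: counter += 1
def SignCounter (Sentence : String) : Int :=
  let puntc : List Char := ['?', ',', '.', '!', ' ', '>']
  Sentence.toList.foldl
    (fun counter i =>
      if ('a' ≤ i ∧ i ≤ 'z') ∨ ('A' ≤ i ∧ i ≤ 'Z') ∨ i ∈ puntc then counter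
      else counter + 1)
    0

-- ===== PORT B =====
-- the regex class [^A-Za-z?,.!> ]: a single char matches iff it is NOT in the class's complement
def inSignClass (c : Char) : Bool :=
  !(('A' ≤ c && c ≤ 'Z') || ('a' ≤ c && c ≤ 'z') ||
    c == '?' || c == ',' || c == '.' || c == '!' || c == '>' || c == ' ')

-- len(_NON_SIGN.findall(Sentence)): the matches of a one-char class are exactly the chars satisfying it
def SignCounter_alt (Sentence : String) : Int :=
  ((Sentence.toList.filter inSignClass).length : Int)

-- ===== PRECONDITION & SPEC =====
def Spec_SignCounter (Sentence : String) (out : Int) : Prop := out = SignCounter_alt Sentence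
instance (Sentence : String) (out : Int) : Decidable (Spec_SignCounter Sentence out) := by unfold Spec_SignCounter; infer_instance

-- ===== CLAIM (what is proved, stated in full; the proofs are below) =====
def Claim_equal_SignCounter : Prop := ∀ (Sentence : String), Dom_SignCounter Sentence → Spec_SignCounter Sentence (SignCounter Sentence)

-- ===== LEMMAS AND PROOFS =====
theorem signCounter_foldl_eq (l : List Char) (k : Int) :
    l.foldl
      (fun counter i =>
        if ('a' ≤ i ∧ i ≤ 'z') ∨ ('A' ≤ i ∧ i ≤ 'Z') ∨ i ∈ (['?', ',', '.', '!', ' ', '>'] : List Char) then counter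
        else counter + 1)
      k = k + ((l.filter inSignClass).length : Int) := by
  induction l generalizing k with
  | nil => simp
  | cons c t ih =>
    have hiff : inSignClass c = true ↔
        ¬(('a' ≤ c ∧ c ≤ 'z') ∨ ('A' ≤ c ∧ c ≤ 'Z') ∨ c ∈ (['?', ',', '.', '!', ' ', '>'] : List Char)) := by
      simp only [inSignClass, Bool.not_eq_true', Bool.or_eq_false_iff, Bool.and_eq_false_iff,
        decide_eq_false_iff_not, beq_eq_false_iff_ne, List.mem_cons, List.not_mem_nil, or_false]
      tauto
    simp only [List.foldl_cons, List.filter_cons]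
    by_cases h : ('a' ≤ c ∧ c ≤ 'z') ∨ ('A' ≤ c ∧ c ≤ 'Z') ∨ c ∈ (['?', ',', '.', '!', ' ', '>'] : List Char)
    · have hc : inSignClass c = false := by
        cases hb : inSignClass c with
        | false => rfl
        | true => exact absurd h (hiff.mp hb)
      rw [if_pos h, hc, ih]
      simp
    · have hc : inSignClass c = true := by
        cases hb : inSignClass c with
        | true => rfl
        | false => exact absurd (hiff.mpr h) (by simp [hb])
      rw [if_neg h, hc, ih]
      simp
      omega

-- ===== VERDICT (by name: the statement is the Claim_ definition above) =====
theorem SignCounter_spec : Claim_equal_SignCounter := by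
  intro s _
  unfold Spec_SignCounter SignCounter SignCounter_alt
  simpa using signCounter_foldl_eq s.toList 0
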